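-- pv_equiv track=rewrite | github.com/jaestefaniah27/online_compiler | arcompile.py | resolver_fqbn_desde_args
-- ===== SOURCE A (Python) =====
-- FQBN_DEFAULT     = "esp32:esp32:esp32"
--
-- BOARD_ALIASES = {
--     "dev":       "esp32:esp32:esp32",
--     "da":        "esp32:esp32:esp32da",
--     "c3":        "esp32:esp32:esp32c3",
--     "esp32c3":   "esp32:esp32:esp32c3",
--     "s3":        "esp32:esp32:esp32s3",
--     "esp32s3":   "esp32:esp32:esp32s3",
--     # NUEVO: Arduino Micro (ATmega32U4)
--     "micro":     "arduino:avr:micro",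
-- }
--
-- def resolver_fqbn_desde_args(args_list):
--     """
--     Soporta:
--       - aliases: dev | da | esp32c3 | c3 | esp32s3 | s3 | micro
--       - fqbn=VENDOR:ARCH:BOARD
--       - si no hay nada, usa FQBN_DEFAULT
--     """
--     fqbn = None
--     for a in args_list:
--         if a.startswith("fqbn="):
--             fqbn = a.split("=", 1)[1]
--         elif a in BOARD_ALIASES:
--             fqbn = BOARD_ALIASES[a]
--     return fqbn or FQBN_DEFAULT
-- ===== SOURCE B (Python) =====
-- FQBN_DEFAULT = "esp32:esp32:esp32"
--
-- BOARD_ALIASES = {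
--     "dev":       "esp32:esp32:esp32",
--     "da":        "esp32:esp32:esp32da",
--     "c3":        "esp32:esp32:esp32c3",
--     "esp32c3":   "esp32:esp32:esp32c3",
--     "s3":        "esp32:esp32:esp32s3",
--     "esp32s3":   "esp32:esp32:esp32s3",
--     "micro":     "arduino:avr:micro",
-- }
--
-- def resolver_fqbn_desde_args(args_list):
--     # scan from the end: the last forward match is the first reverse match
--     for a in reversed(args_list):
--         if a.startswith("fqbn="):
--             return a[len("fqbn="):] or FQBN_DEFAULT
--         if a in BOARD_ALIASES:
--             return BOARD_ALIASES[a]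
--     return FQBN_DEFAULT
-- ===== Notes on version B (the rewrite author's own statement) =====
-- stated objective: alternative
-- what changed: B scans args_list in reverse and returns at the first match (last-match-wins becomes first-reverse-match with early exit), taking the fqbn value by slicing off the 'fqbn=' prefix instead of split, instead of A's full forward pass that keeps overwriting an accumulator.
import Mathlib
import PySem

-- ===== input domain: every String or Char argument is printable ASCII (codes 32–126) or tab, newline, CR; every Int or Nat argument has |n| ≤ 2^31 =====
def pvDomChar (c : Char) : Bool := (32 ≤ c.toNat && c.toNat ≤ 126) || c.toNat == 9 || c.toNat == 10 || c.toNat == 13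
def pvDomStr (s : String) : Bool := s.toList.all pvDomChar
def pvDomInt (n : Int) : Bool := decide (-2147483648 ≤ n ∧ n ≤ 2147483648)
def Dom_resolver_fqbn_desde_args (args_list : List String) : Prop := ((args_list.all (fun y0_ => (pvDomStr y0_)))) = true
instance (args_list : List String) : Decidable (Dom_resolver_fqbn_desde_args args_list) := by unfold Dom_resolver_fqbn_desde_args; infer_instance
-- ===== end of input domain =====

-- B scans the list in reverse and returns at the first match (slicing off the "fqbn=" prefix),
-- instead of A's full forward pass that keeps overwriting an accumulator; objective: alternative.

-- ===== PORT A =====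
def pvFQBN_DEFAULT : String := "esp32:esp32:esp32"

def pvBOARD_ALIASES : PySem.Dict String String :=
  PySem.Dict.ofList
    [("dev", "esp32:esp32:esp32"), ("da", "esp32:esp32:esp32da"),
     ("c3", "esp32:esp32:esp32c3"), ("esp32c3", "esp32:esp32:esp32c3"),
     ("s3", "esp32:esp32:esp32s3"), ("esp32s3", "esp32:esp32:esp32s3"),
     ("micro", "arduino:avr:micro")]

def resolver_fqbn_desde_args (args_list : List String) : String :=
  let fqbn : Option String :=
    args_list.foldl (fun fqbn a =>
      if PySem.Str.startswith a "fqbn=" then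
        -- a.split("=", 1)[1]; the defaults of getD are never reached: "=" ≠ "" so the
        -- split succeeds, and a starts with "fqbn=", so the split has a piece at index 1
        some (((PySem.Str.splitMax? a "=" 1).getD []).getD 1 "")
      else if pvBOARD_ALIASES.contains a then
        some (pvBOARD_ALIASES.getD a "")   -- BOARD_ALIASES[a]; contains holds, getD's default unreached
      else fqbn) none
  -- return fqbn or FQBN_DEFAULT
  match fqbn with
  | some s => if s = "" then pvFQBN_DEFAULT else s
  | none => pvFQBN_DEFAULT

-- ===== PORT B =====
def pvAltLoop : List String → String
  | [] => pvFQBN_DEFAULT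
  | a :: rest =>
    if PySem.Str.startswith a "fqbn=" then
      -- a[len("fqbn="):] or FQBN_DEFAULT
      let v := PySem.Str.slice a (some 5) none
      if v = "" then pvFQBN_DEFAULT else v
    else if pvBOARD_ALIASES.contains a then
      pvBOARD_ALIASES.getD a ""   -- BOARD_ALIASES[a]; contains holds, default unreached
    else pvAltLoop rest

def resolver_fqbn_desde_args_alt (args_list : List String) : String :=
  pvAltLoop args_list.reverse

-- ===== PRECONDITION & SPEC =====
def Spec_resolver_fqbn_desde_args (args_list : List String) (out : String) : Prop := out = resolver_fqbn_desde_args_alt args_list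
instance (args_list : List String) (out : String) : Decidable (Spec_resolver_fqbn_desde_args args_list out) := by unfold Spec_resolver_fqbn_desde_args; infer_instance

-- ===== CLAIM (what is proved, stated in full; the proofs are below) =====
def Claim_equal_resolver_fqbn_desde_args : Prop := ∀ (args_list : List String), Dom_resolver_fqbn_desde_args args_list → Spec_resolver_fqbn_desde_args args_list (resolver_fqbn_desde_args args_list)

-- ===== LEMMAS AND PROOFS =====

-- the candidate a single argument contributes (A's forward loop keeps the last one)
def pvMatchOf (a : String) : Option String :=
  if PySem.Str.startswith a "fqbn=" then
    some (((PySem.Str.splitMax? a "=" 1).getD []).getD 1 "")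
  else if pvBOARD_ALIASES.contains a then
    some (pvBOARD_ALIASES.getD a "")
  else none

theorem pvStep_eq :
    (fun (fqbn : Option String) (a : String) =>
      if PySem.Str.startswith a "fqbn=" then
        some (((PySem.Str.splitMax? a "=" 1).getD []).getD 1 "")
      else if pvBOARD_ALIASES.contains a then
        some (pvBOARD_ALIASES.getD a "")
      else fqbn) = fun st a => (pvMatchOf a).or st := by
  funext st a
  unfold pvMatchOf; split_ifs <;> rfl

theorem pvFold_eq (l : List String) (st : Option String) :
    l.foldl (fun st a => (pvMatchOf a).or st) st = (l.reverse.findSome? pvMatchOf).or st := by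
  induction l generalizing st with
  | nil => rfl
  | cons a t ih =>
      rw [List.foldl_cons, ih, List.reverse_cons, List.findSome?_append]
      cases t.reverse.findSome? pvMatchOf <;> cases h : pvMatchOf a <;>
        simp [h, Option.or]

-- a key contained in the alias table maps to a non-empty board name
theorem pvAlias_ne_empty (a : String) (h : pvBOARD_ALIASES.contains a = true) :
    pvBOARD_ALIASES.getD a "" ≠ "" := by
  have hi : pvBOARD_ALIASES.items =
    [("dev", "esp32:esp32:esp32"), ("da", "esp32:esp32:esp32da"),
     ("c3", "esp32:esp32:esp32c3"), ("esp32c3", "esp32:esp32:esp32c3"),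
     ("s3", "esp32:esp32:esp32s3"), ("esp32s3", "esp32:esp32:esp32s3"),
     ("micro", "arduino:avr:micro")] := by decide
  simp [pvBOARD_ALIASES, PySem.Dict.contains] at h
  obtain ⟨v, hv⟩ := h
  rw [show (PySem.Dict.ofList
    [("dev", "esp32:esp32:esp32"), ("da", "esp32:esp32:esp32da"),
     ("c3", "esp32:esp32:esp32c3"), ("esp32c3", "esp32:esp32:esp32c3"),
     ("s3", "esp32:esp32:esp32s3"), ("esp32s3", "esp32:esp32:esp32s3"),
     ("micro", "arduino:avr:micro")] : PySem.Dict String String).items =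
    [("dev", "esp32:esp32:esp32"), ("da", "esp32:esp32:esp32da"),
     ("c3", "esp32:esp32:esp32c3"), ("esp32c3", "esp32:esp32:esp32c3"),
     ("s3", "esp32:esp32:esp32s3"), ("esp32s3", "esp32:esp32:esp32s3"),
     ("micro", "arduino:avr:micro")] from hi] at hv
  simp [Prod.ext_iff] at hv
  rcases hv with ⟨rfl,-⟩|⟨rfl,-⟩|⟨rfl,-⟩|⟨rfl,-⟩|⟨rfl,-⟩|⟨rfl,-⟩|⟨rfl,-⟩ <;> decide

theorem pvGo_zero (sep : List Char) (fuel : Nat) (l cur : List Char) (acc : List (List Char)) :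
    PySem.Chars.splitOnMax.go sep fuel 0 l cur acc = ((cur.reverse ++ l) :: acc).reverse := by
  cases fuel <;> cases l <;> simp [PySem.Chars.splitOnMax.go]

-- on a string starting with "fqbn=", A's a.split("=", 1)[1] is B's a[5:]
theorem pvSplit_eq_slice (a : String) (h : PySem.Str.startswith a "fqbn=" = true) :
    ((PySem.Str.splitMax? a "=" 1).getD []).getD 1 "" = PySem.Str.slice a (some 5) none := by
  rw [show (5 : Int) = ((5 : Nat) : Int) from rfl]
  simp only [PySem.Str.startswith_eq] at h
  rw [PySem.Chars.startswith_iff] at h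
  obtain ⟨t, ht⟩ := h
  have hl : a.toList = 'f' :: 'q' :: 'b' :: 'n' :: '=' :: t := by simpa using ht.symm
  apply String.toList_injective
  simp [PySem.Str.splitMax?, PySem.Str.slice, hl, PySem.Chars.splitMax?,
    PySem.Chars.splitOnMax, PySem.Chars.splitOnMax.go, pvGo_zero,
    PySem.Chars.slice_eq_listSlice, PySem.List.slice]

theorem pvAltLoop_eq (l : List String) :
    pvAltLoop l = (match l.findSome? pvMatchOf with
      | some s => if s = "" then pvFQBN_DEFAULT else s
      | none => pvFQBN_DEFAULT) := by
  induction l with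
  | nil => rfl
  | cons a t ih =>
      rw [pvAltLoop, List.findSome?_cons]
      by_cases h1 : PySem.Str.startswith a "fqbn=" = true
      · have hm : pvMatchOf a = some (PySem.Str.slice a (some 5) none) := by
          rw [pvMatchOf, if_pos h1, pvSplit_eq_slice a h1]
        rw [hm, if_pos h1]
      · by_cases h2 : pvBOARD_ALIASES.contains a = true
        · have hm : pvMatchOf a = some (pvBOARD_ALIASES.getD a "") := by
            rw [pvMatchOf, if_neg h1, if_pos h2]
          rw [hm, if_neg h1, if_pos h2]
          exact (if_neg (pvAlias_ne_empty a h2)).symm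
        · have hm : pvMatchOf a = none := by rw [pvMatchOf, if_neg h1, if_neg h2]
          rw [hm, if_neg h1, if_neg h2]
          exact ih

-- ===== VERDICT (by name: the statement is the Claim_ definition above) =====
theorem resolver_fqbn_desde_args_spec : Claim_equal_resolver_fqbn_desde_args := by
  intro args_list _
  unfold Spec_resolver_fqbn_desde_args resolver_fqbn_desde_args resolver_fqbn_desde_args_alt
  rw [pvStep_eq, pvFold_eq, pvAltLoop_eq]
  cases args_list.reverse.findSome? pvMatchOf <;> rfl
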